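-- pv_equiv track=rewrite | github.com/saenyakorn/2110101-COMP-PROG | P2/P2_08_Thai.py | to_Thai
-- ===== SOURCE A (Python) =====
-- number = ['soon','neung','song','sam','si','ha','hok','chet','paet','kao','sip',\
--     'et','yi','roi','pun']
--
-- def to_Thai(n):
--     if n <= 10:
--         return number[n]
--     elif n == 11:
--         return number[10] + ' ' + number[11]
--     elif 11 < n < 20:
--         return number[10] + ' ' + number[n%10]
--     elif n == 20:
--         return number[12] + ' ' + number[10]
--     elif n == 21:
--         return number[12] + ' ' + number[10] + ' ' + number[11]
--     elif 21 < n < 30: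
--         return number[12] + ' ' + number[10] + ' ' + number[n%10]
--     elif n < 100 and n%10 == 0:
--         return number[n//10] + ' ' + number[10]
--     elif n < 100 and n%10 == 1:
--         return number[n//10] + ' ' + number[10] + ' ' + number[11]
--     elif n < 100:
--         return number[n//10] + ' ' + number[10] + ' ' + number[n%10]
--     elif 100 <= n <= 999:
--         if n%100 == 0:
--             return number[n//100] + ' ' + number[13]
--         elif n%100 == 1:
--             return number[n//100] + ' ' + number[13] + ' ' + number[11]
--         else:
--             return number[n//100] + ' ' + number[13] + ' ' + to_Thai(n%100)
--     elif 1000 <= n <= 9999: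
--         if n%1000 == 0:
--             return number[n//1000] + ' ' + number[14]
--         elif n%1000 == 1:
--             return number[n//1000] + ' ' + number[14] + ' ' + number[11]
--         else:
--             return number[n//1000] + ' ' + number[14] + ' ' + to_Thai(n%1000)
-- ===== SOURCE B (Python) =====
-- number = ['soon','neung','song','sam','si','ha','hok','chet','paet','kao','sip',\
--     'et','yi','roi','pun']
--
-- def to_Thai(n):
--     if n <= 10:
--         return number[n]
--     if n <= 9999:
--         t, h, te, u = n // 1000, n // 100 % 10, n // 10 % 10, n % 10
--         parts = []
--         if t:
--             parts.append(number[t] + ' pun')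
--         if h:
--             parts.append(number[h] + ' roi')
--         if te == 1:
--             parts.append('sip')
--         elif te == 2:
--             parts.append('yi sip')
--         elif te:
--             parts.append(number[te] + ' sip')
--         if u == 1:
--             parts.append('et')
--         elif u:
--             parts.append(number[u])
--         return ' '.join(parts)
-- ===== Notes on version B (the rewrite author's own statement) =====
-- stated objective: simpler
-- what changed: A's long recursive chain of range cases is replaced by one digit decomposition (thousands/hundreds/tens/units) that collects place-value word parts in a list and joins them with spaces.
-- outside the precondition, e.g. on to_Thai(10000): A returns None, B returns None; on to_Thai(-16): A raises IndexError, B raises IndexError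
import Mathlib
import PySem

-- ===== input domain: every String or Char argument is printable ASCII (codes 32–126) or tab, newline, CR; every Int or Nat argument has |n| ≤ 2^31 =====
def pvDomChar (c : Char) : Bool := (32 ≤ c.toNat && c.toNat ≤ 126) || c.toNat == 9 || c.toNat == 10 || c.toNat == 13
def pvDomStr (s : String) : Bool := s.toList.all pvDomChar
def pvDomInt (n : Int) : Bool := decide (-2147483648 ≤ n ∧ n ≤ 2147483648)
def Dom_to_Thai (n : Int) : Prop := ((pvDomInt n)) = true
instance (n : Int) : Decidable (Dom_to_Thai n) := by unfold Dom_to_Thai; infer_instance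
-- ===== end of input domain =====

-- B replaces A's long recursive chain of range cases by a single digit-decomposition that
-- joins place-value parts ("pun"/"roi"/"sip"/units); objective: simpler. Equivalence of
-- return values is claimed for -15 ≤ n ≤ 9999 (see Pre_to_Thai).


-- ===== PORT A =====
-- Strings are handled on the List Char side (PySem.Chars convention); 'to_Thai' wraps the
-- char-level transliteration with String.ofList.
def pvNumber : List (List Char) := ["soon".toList,"neung".toList,"song".toList,"sam".toList,
  "si".toList,"ha".toList,"hok".toList,"chet".toList,"paet".toList,"kao".toList,"sip".toList,
  "et".toList,"yi".toList,"roi".toList,"pun".toList]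

-- number[i]; the IndexError case (pyGet? = none, i.e. n < -15) is excluded by Pre_to_Thai,
-- so the [] default is never reached inside the claim.
def pvNum (i : Int) : List Char := (PySem.List.pyGet? pvNumber i).getD []

def pvSp : List Char := [' ']  -- the ' ' literal of the Python sources

-- Structural fuel makes the recursion kernel-reducible; A's recursion depth is at most 3
-- (thousands -> hundreds -> base), so fuel 3 is never exhausted on any input.
def to_ThaiAux : Nat → Int → List Char
  | 0, _ => []  -- unreachable for fuel 3 (recursion depth ≤ 3)
  | f+1, n =>
  if n ≤ 10 then pvNum n
  else if n = 11 then pvNum 10 ++ pvSp ++ pvNum 11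
  else if 11 < n ∧ n < 20 then pvNum 10 ++ pvSp ++ pvNum (PySem.Int.mod n 10)
  else if n = 20 then pvNum 12 ++ pvSp ++ pvNum 10
  else if n = 21 then pvNum 12 ++ pvSp ++ pvNum 10 ++ pvSp ++ pvNum 11
  else if 21 < n ∧ n < 30 then pvNum 12 ++ pvSp ++ pvNum 10 ++ pvSp ++ pvNum (PySem.Int.mod n 10)
  else if n < 100 ∧ PySem.Int.mod n 10 = 0 then pvNum (PySem.Int.floordiv n 10) ++ pvSp ++ pvNum 10
  else if n < 100 ∧ PySem.Int.mod n 10 = 1 then pvNum (PySem.Int.floordiv n 10) ++ pvSp ++ pvNum 10 ++ pvSp ++ pvNum 11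
  else if n < 100 then pvNum (PySem.Int.floordiv n 10) ++ pvSp ++ pvNum 10 ++ pvSp ++ pvNum (PySem.Int.mod n 10)
  else if 100 ≤ n ∧ n ≤ 999 then
    if PySem.Int.mod n 100 = 0 then pvNum (PySem.Int.floordiv n 100) ++ pvSp ++ pvNum 13
    else if PySem.Int.mod n 100 = 1 then pvNum (PySem.Int.floordiv n 100) ++ pvSp ++ pvNum 13 ++ pvSp ++ pvNum 11
    else pvNum (PySem.Int.floordiv n 100) ++ pvSp ++ pvNum 13 ++ pvSp ++ to_ThaiAux f (PySem.Int.mod n 100)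
  else if 1000 ≤ n ∧ n ≤ 9999 then
    if PySem.Int.mod n 1000 = 0 then pvNum (PySem.Int.floordiv n 1000) ++ pvSp ++ pvNum 14
    else if PySem.Int.mod n 1000 = 1 then pvNum (PySem.Int.floordiv n 1000) ++ pvSp ++ pvNum 14 ++ pvSp ++ pvNum 11
    else pvNum (PySem.Int.floordiv n 1000) ++ pvSp ++ pvNum 14 ++ pvSp ++ to_ThaiAux f (PySem.Int.mod n 1000)
  else []  -- Python falls through and returns None here (n > 9999); excluded by Pre_to_Thai

def to_ThaiChars (n : Int) : List Char := to_ThaiAux 3 n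

def to_Thai (n : Int) : String := String.ofList (to_ThaiChars n)

-- ===== PORT B =====
def to_ThaiChars_alt (n : Int) : List Char :=
  if n ≤ 10 then pvNum n
  else if n ≤ 9999 then
    let t := PySem.Int.floordiv n 1000
    let h := PySem.Int.mod (PySem.Int.floordiv n 100) 10
    let te := PySem.Int.mod (PySem.Int.floordiv n 10) 10
    let u := PySem.Int.mod n 10
    let parts : List (List Char) :=
      (if t ≠ 0 then [pvNum t ++ " pun".toList] else []) ++
      (if h ≠ 0 then [pvNum h ++ " roi".toList] else []) ++
      (if te = 1 then ["sip".toList]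
       else if te = 2 then ["yi sip".toList]
       else if te ≠ 0 then [pvNum te ++ " sip".toList] else []) ++
      (if u = 1 then ["et".toList]
       else if u ≠ 0 then [pvNum u] else [])
    PySem.Chars.join pvSp parts
  else []  -- Python B falls through and returns None here; excluded by Pre_to_Thai

def to_Thai_alt (n : Int) : String := String.ofList (to_ThaiChars_alt n)

-- ===== PRECONDITION & SPEC =====
-- Pre_ excludes n < -15 (A raises IndexError) and n > 9999 (A falls through and returns
-- None, which is not a String value).
def Pre_to_Thai (n : Int) : Prop := -15 ≤ n ∧ n ≤ 9999
instance (n : Int) : Decidable (Pre_to_Thai n) := by unfold Pre_to_Thai; infer_instance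
def pvWitness_to_Thai : Int := (2021)

def Spec_to_Thai (n : Int) (out : String) : Prop := out = to_Thai_alt n
instance (n : Int) (out : String) : Decidable (Spec_to_Thai n out) := by unfold Spec_to_Thai; infer_instance

-- ===== CLAIM (what is proved, stated in full; the proofs are below) =====
def Claim_equal_to_Thai : Prop := ∀ (n : Int), Dom_to_Thai n → Pre_to_Thai n → Spec_to_Thai n (to_Thai n)

-- ===== LEMMAS AND PROOFS =====
-- Digit-part abbreviations mirroring the parts list of to_ThaiChars_alt (proof-only).
def pvTU (n : Int) : List (List Char) :=
  (if PySem.Int.mod (PySem.Int.floordiv n 10) 10 = 1 then ["sip".toList]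
   else if PySem.Int.mod (PySem.Int.floordiv n 10) 10 = 2 then ["yi sip".toList]
   else if PySem.Int.mod (PySem.Int.floordiv n 10) 10 ≠ 0 then
     [pvNum (PySem.Int.mod (PySem.Int.floordiv n 10) 10) ++ " sip".toList] else []) ++
  (if PySem.Int.mod n 10 = 1 then ["et".toList]
   else if PySem.Int.mod n 10 ≠ 0 then [pvNum (PySem.Int.mod n 10)] else [])

def pvHTU (n : Int) : List (List Char) :=
  (if PySem.Int.mod (PySem.Int.floordiv n 100) 10 ≠ 0 then
     [pvNum (PySem.Int.mod (PySem.Int.floordiv n 100) 10) ++ " roi".toList] else []) ++ pvTU n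

lemma join_cons_ne (sep x : List Char) (l : List (List Char)) (h : l ≠ []) :
    PySem.Chars.join sep (x :: l) = x ++ sep ++ PySem.Chars.join sep l := by
  cases l with
  | nil => exact absurd rfl h
  | cons y t => rw [PySem.Chars.join_cons_cons]

lemma alt_eq (n : Int) (h1 : ¬ n ≤ 10) (h2 : n ≤ 9999) :
    to_ThaiChars_alt n = PySem.Chars.join pvSp
      ((if PySem.Int.floordiv n 1000 ≠ 0 then [pvNum (PySem.Int.floordiv n 1000) ++ " pun".toList] else []) ++ pvHTU n) := by
  unfold to_ThaiChars_alt pvHTU pvTU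
  rw [if_neg h1, if_pos h2]
  simp only [List.append_assoc]

lemma aux_le10 (f : Nat) (n : Int) (h : n ≤ 10) : to_ThaiAux (f+1) n = pvNum n := by
  unfold to_ThaiAux
  rw [if_pos h]

lemma aux_fuel (f g : Nat) (n : Int) (h : n < 100) : to_ThaiAux (f+1) n = to_ThaiAux (g+1) n := by
  unfold to_ThaiAux
  split_ifs <;> first | rfl | (exfalso; omega)

set_option maxHeartbeats 1000000 in
set_option maxRecDepth 10000 in
lemma tu_decide : ∀ k ∈ List.range 98,
    to_ThaiAux 1 ((k : Int) + 2) = PySem.Chars.join pvSp (pvTU ((k : Int) + 2)) := by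
  decide

lemma aux_tens (f : Nat) (n : Int) (h2 : 2 ≤ n) (h99 : n ≤ 99) :
    to_ThaiAux (f+1) n = PySem.Chars.join pvSp (pvTU n) := by
  rw [aux_fuel f 0 n (by omega)]
  have hmem : (n - 2).toNat ∈ List.range 98 := by exact List.mem_range.mpr (by omega)
  have := tu_decide (n - 2).toNat hmem
  have hc : (((n - 2).toNat : Int) + 2) = n := by omega
  rwa [hc] at this

lemma tu_nonempty (n : Int) (h : ¬ (PySem.Int.mod (PySem.Int.floordiv n 10) 10 = 0 ∧ PySem.Int.mod n 10 = 0)) :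
    pvTU n ≠ [] := by
  intro hnil
  unfold pvTU at hnil
  have hAB := List.append_eq_nil_iff.mp hnil
  have hA := hAB.1
  have hB := hAB.2
  split_ifs at hA hB <;>
    first
      | exact List.noConfusion hA
      | exact List.noConfusion hB
      | exact h (by tauto)

lemma aux_hundreds (f : Nat) (n : Int) (hlo : 100 ≤ n) (hhi : n ≤ 999) :
    to_ThaiAux (f+2) n = PySem.Chars.join pvSp (pvHTU n) := by
  have hde : PySem.Int.floordiv n 100 = n / 100 := PySem.Int.floordiv_eq_ediv_of_pos (by decide)
  have hme : PySem.Int.mod n 100 = n % 100 := PySem.Int.mod_eq_emod_of_pos (by decide)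
  have hd10 : PySem.Int.floordiv n 10 = n / 10 := PySem.Int.floordiv_eq_ediv_of_pos (by decide)
  have hm10e : ∀ m : Int, PySem.Int.mod m 10 = m % 10 := fun m => PySem.Int.mod_eq_emod_of_pos (by decide)
  -- the hundreds digit of n is n / 100 itself
  have hdig : PySem.Int.mod (PySem.Int.floordiv n 100) 10 = PySem.Int.floordiv n 100 := by
    rw [hde, hm10e]; omega
  have hhtu : pvHTU n = [pvNum (PySem.Int.floordiv n 100) ++ " roi".toList] ++ pvTU n := by
    unfold pvHTU
    rw [hdig, if_pos (by rw [hde]; omega)]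
  -- digits of n below 100 agree with those of n % 100
  have e1 : PySem.Int.mod (PySem.Int.floordiv (PySem.Int.mod n 100) 10) 10
      = PySem.Int.mod (PySem.Int.floordiv n 10) 10 := by
    rw [hme, hd10, hm10e, hm10e, PySem.Int.floordiv_eq_ediv_of_pos (by decide)]; omega
  have e2 : PySem.Int.mod (PySem.Int.mod n 100) 10 = PySem.Int.mod n 10 := by
    rw [hme, hm10e, hm10e]; omega
  have htu : pvTU (PySem.Int.mod n 100) = pvTU n := by
    unfold pvTU
    rw [e1, e2]
  unfold to_ThaiAux
  rw [if_neg (by omega), if_neg (by omega), if_neg (by omega), if_neg (by omega),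
      if_neg (by omega), if_neg (by omega),
      if_neg (by rintro ⟨h, -⟩; omega), if_neg (by rintro ⟨h, -⟩; omega), if_neg (by omega),
      if_pos (⟨hlo, hhi⟩ : 100 ≤ n ∧ n ≤ 999)]
  by_cases hr0 : PySem.Int.mod n 100 = 0
  · rw [if_pos hr0, hhtu]
    have htu0 : pvTU n = [] := by
      unfold pvTU
      rw [if_neg (by rw [hm10e, hd10]; rw [hme] at hr0; omega),
          if_neg (by rw [hm10e, hd10]; rw [hme] at hr0; omega),
          if_neg (by simp only [hm10e, hd10]; rw [hme] at hr0; omega),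
          if_neg (by rw [hm10e]; rw [hme] at hr0; omega),
          if_neg (by simp only [hm10e]; rw [hme] at hr0; omega)]
      rfl
    rw [htu0, List.append_nil, PySem.Chars.join_singleton]
    have : pvNum 13 = "roi".toList := by decide
    rw [this, List.append_assoc]
    rfl
  · by_cases hr1 : PySem.Int.mod n 100 = 1
    · rw [if_neg hr0, if_pos hr1, hhtu]
      have htu1 : pvTU n = ["et".toList] := by
        unfold pvTU
        rw [if_neg (by rw [hm10e, hd10]; rw [hme] at hr1; omega),
            if_neg (by rw [hm10e, hd10]; rw [hme] at hr1; omega),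
            if_neg (by simp only [hm10e, hd10]; rw [hme] at hr1; omega),
            if_pos (by rw [hm10e]; rw [hme] at hr1; omega)]
        rfl
      rw [htu1, List.singleton_append]
      rw [join_cons_ne _ _ _ (List.cons_ne_nil _ _), PySem.Chars.join_singleton]
      have h13 : pvNum 13 = "roi".toList := by decide
      have h11 : pvNum 11 = "et".toList := by decide
      have hsp : " roi".toList = pvSp ++ "roi".toList := by decide
      rw [h13, h11, hsp]
      simp only [List.append_assoc]
    · rw [if_neg hr0, if_neg hr1]
      have hrr : to_ThaiAux (f+1) (PySem.Int.mod n 100) = PySem.Chars.join pvSp (pvTU n) := by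
        rw [aux_tens f _ (by rw [hme]; omega) (by rw [hme]; omega), htu]
      rw [hrr, hhtu, List.singleton_append]
      rw [join_cons_ne _ _ _ (tu_nonempty n (by rw [hm10e, hd10, hm10e]; rw [hme] at hr0 hr1; omega))]
      have h13 : pvNum 13 = "roi".toList := by decide
      have hsp : " roi".toList = pvSp ++ "roi".toList := by decide
      rw [h13, hsp]
      simp only [List.append_assoc]

lemma htu_nonempty (n : Int) (h : ¬ (PySem.Int.mod (PySem.Int.floordiv n 100) 10 = 0 ∧
    PySem.Int.mod (PySem.Int.floordiv n 10) 10 = 0 ∧ PySem.Int.mod n 10 = 0)) :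
    pvHTU n ≠ [] := by
  intro hnil
  unfold pvHTU pvTU at hnil
  have hAB := List.append_eq_nil_iff.mp hnil
  have hA := hAB.1
  have hBC := List.append_eq_nil_iff.mp hAB.2
  have hB := hBC.1
  have hC := hBC.2
  split_ifs at hA hB hC <;>
    first
      | exact List.noConfusion hA
      | exact List.noConfusion hB
      | exact List.noConfusion hC
      | exact h (by tauto)

lemma aux_below_thousand (f : Nat) (n : Int) (h2 : 2 ≤ n) (hhi : n ≤ 999) :
    to_ThaiAux (f+2) n = PySem.Chars.join pvSp (pvHTU n) := by
  by_cases hc : n ≤ 99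
  · have hh0 : pvHTU n = pvTU n := by
      unfold pvHTU
      rw [if_neg (by
        rw [PySem.Int.mod_eq_emod_of_pos (by decide), PySem.Int.floordiv_eq_ediv_of_pos (by decide)]
        omega)]
      rfl
    rw [hh0]
    exact aux_tens (f+1) n h2 hc
  · exact aux_hundreds f n (by omega) hhi

lemma aux_thousands (f : Nat) (n : Int) (hlo : 1000 ≤ n) (hhi : n ≤ 9999) :
    to_ThaiAux (f+3) n = to_ThaiChars_alt n := by
  have hde : PySem.Int.floordiv n 1000 = n / 1000 := PySem.Int.floordiv_eq_ediv_of_pos (by decide)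
  have hme : PySem.Int.mod n 1000 = n % 1000 := PySem.Int.mod_eq_emod_of_pos (by decide)
  rw [alt_eq n (by omega) hhi, if_pos (by rw [hde]; omega)]
  -- digits below 1000 agree with those of n % 1000
  have e1 : PySem.Int.mod (PySem.Int.floordiv (PySem.Int.mod n 1000) 100) 10
      = PySem.Int.mod (PySem.Int.floordiv n 100) 10 := by
    rw [hme, PySem.Int.mod_eq_emod_of_pos (by decide), PySem.Int.mod_eq_emod_of_pos (by decide),
        PySem.Int.floordiv_eq_ediv_of_pos (by decide), PySem.Int.floordiv_eq_ediv_of_pos (by decide)]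
    omega
  have e2 : PySem.Int.mod (PySem.Int.floordiv (PySem.Int.mod n 1000) 10) 10
      = PySem.Int.mod (PySem.Int.floordiv n 10) 10 := by
    rw [hme, PySem.Int.mod_eq_emod_of_pos (by decide), PySem.Int.mod_eq_emod_of_pos (by decide),
        PySem.Int.floordiv_eq_ediv_of_pos (by decide), PySem.Int.floordiv_eq_ediv_of_pos (by decide)]
    omega
  have e3 : PySem.Int.mod (PySem.Int.mod n 1000) 10 = PySem.Int.mod n 10 := by
    rw [hme, PySem.Int.mod_eq_emod_of_pos (by decide), PySem.Int.mod_eq_emod_of_pos (by decide)]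
    omega
  have hhtu : pvHTU (PySem.Int.mod n 1000) = pvHTU n := by
    unfold pvHTU pvTU
    rw [e1, e2, e3]
  show to_ThaiAux (f+2+1) n = _
  unfold to_ThaiAux
  rw [if_neg (by omega), if_neg (by omega), if_neg (by omega), if_neg (by omega),
      if_neg (by omega), if_neg (by omega),
      if_neg (by rintro ⟨h, -⟩; omega), if_neg (by rintro ⟨h, -⟩; omega), if_neg (by omega),
      if_neg (by rintro ⟨-, h⟩; omega),
      if_pos (⟨hlo, hhi⟩ : 1000 ≤ n ∧ n ≤ 9999)]
  have h14 : pvNum 14 = "pun".toList := by decide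
  by_cases hr0 : PySem.Int.mod n 1000 = 0
  · rw [if_pos hr0]
    have hh0 : pvHTU n = [] := by
      rw [← hhtu, hr0]
      decide
    rw [hh0, List.append_nil, PySem.Chars.join_singleton, h14, List.append_assoc]
    rfl
  · by_cases hr1 : PySem.Int.mod n 1000 = 1
    · rw [if_neg hr0, if_pos hr1]
      have hh1 : pvHTU n = ["et".toList] := by
        rw [← hhtu, hr1]
        decide
      rw [hh1, List.singleton_append, join_cons_ne _ _ _ (List.cons_ne_nil _ _), PySem.Chars.join_singleton, h14]
      have h11 : pvNum 11 = "et".toList := by decide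
      have hsp : " pun".toList = pvSp ++ "pun".toList := by decide
      rw [h11, hsp]
      simp only [List.append_assoc]
    · rw [if_neg hr0, if_neg hr1]
      have hrr : to_ThaiAux (f+2) (PySem.Int.mod n 1000) = PySem.Chars.join pvSp (pvHTU n) := by
        rw [aux_below_thousand f _ (by rw [hme]; omega) (by rw [hme]; omega), hhtu]
      rw [hrr, List.singleton_append]
      rw [join_cons_ne _ _ _ (htu_nonempty n (by
        rw [PySem.Int.mod_eq_emod_of_pos (by decide : (0:Int) < 10),
            PySem.Int.mod_eq_emod_of_pos (by decide : (0:Int) < 10),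
            PySem.Int.mod_eq_emod_of_pos (by decide : (0:Int) < 10),
            PySem.Int.floordiv_eq_ediv_of_pos (by decide : (0:Int) < 100),
            PySem.Int.floordiv_eq_ediv_of_pos (by decide : (0:Int) < 10)]
        rw [hme] at hr0 hr1
        omega))]
      have hsp : " pun".toList = pvSp ++ "pun".toList := by decide
      rw [h14, hsp]
      simp only [List.append_assoc]

lemma chars_eq (n : Int) (h1 : -15 ≤ n) (h2 : n ≤ 9999) :
    to_ThaiChars n = to_ThaiChars_alt n := by
  unfold to_ThaiChars
  by_cases hle : n ≤ 10
  · rw [show (3 : Nat) = 2+1 from rfl, aux_le10 2 n hle]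
    unfold to_ThaiChars_alt
    rw [if_pos hle]
  · by_cases hth : n ≤ 999
    · rw [alt_eq n hle h2,
          if_neg (by
            rw [PySem.Int.floordiv_eq_ediv_of_pos (by decide : (0:Int) < 1000)]
            omega)]
      exact aux_below_thousand 1 n (by omega) hth
    · exact aux_thousands 0 n (by omega) h2

-- ===== VERDICT (by name: the statement is the Claim_ definition above) =====
theorem to_Thai_spec : Claim_equal_to_Thai := by
  intro n _ hpre
  show to_Thai n = to_Thai_alt n
  unfold to_Thai to_Thai_alt
  exact congrArg String.ofList (chars_eq n hpre.1 hpre.2)
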